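-- pv_equiv track=rewrite | github.com/telemt/telemt | tools/tlsearch.py | normalize_u8_list
-- ===== SOURCE A (Python) =====
-- from typing import Any, Iterable
--
-- def normalize_u8_list(value: Any) -> list[int]:
--     if not isinstance(value, list):
--         return []
--     out: list[int] = []
--     for item in value:
--         if isinstance(item, int) and 0 <= item <= 0xFF:
--             out.append(item)
--         else:
--             return []
--     return out
-- ===== SOURCE B (Python) =====
-- def normalize_u8_list(value):
--     # bytes() itself enforces "iterable of ints in 0..255": it raises
--     # TypeError/ValueError on any offending element, so no explicit
--     # per-element validation loop is needed.
--     if not isinstance(value, list):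
--         return []
--     try:
--         return list(bytes(value))
--     except (TypeError, ValueError):
--         return []
-- ===== Notes on version B (the rewrite author's own statement) =====
-- stated objective: idiomatic
-- what changed: B delegates the whole 0..255/int validation and conversion to Python's bytes() constructor (exception-based), returning list(bytes(value)) or [] on TypeError/ValueError, instead of A's explicit per-element loop with accumulation and early return.
import Mathlib
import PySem

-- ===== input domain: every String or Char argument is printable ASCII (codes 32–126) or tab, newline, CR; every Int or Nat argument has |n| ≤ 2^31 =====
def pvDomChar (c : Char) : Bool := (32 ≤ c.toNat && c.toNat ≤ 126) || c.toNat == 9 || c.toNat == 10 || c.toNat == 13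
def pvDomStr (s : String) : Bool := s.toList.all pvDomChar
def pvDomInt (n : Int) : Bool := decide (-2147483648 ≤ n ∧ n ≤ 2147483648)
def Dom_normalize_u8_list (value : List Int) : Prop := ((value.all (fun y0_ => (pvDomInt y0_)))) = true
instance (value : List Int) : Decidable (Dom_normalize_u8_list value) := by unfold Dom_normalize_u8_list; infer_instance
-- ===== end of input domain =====

-- B hands validation+conversion to bytes() (exception-based) instead of A's explicit accumulating loop; same return value, idiomatic.

-- ===== PORT A =====
-- the loop of A: append each in-range item to `out`, return [] at the first bad item
def normalize_u8_list_loop (out : List Int) : List Int → List Int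
  | [] => out
  | item :: rest =>
      if 0 ≤ item ∧ item ≤ 0xFF then
        normalize_u8_list_loop (out ++ [item]) rest
      else
        []

def normalize_u8_list (value : List Int) : List Int :=
  normalize_u8_list_loop [] value

-- ===== PORT B =====
-- bytes(value): converts the whole list at once, `none` models the raised TypeError/ValueError
def pyBytes? : List Int → Option (List Int)
  | [] => some []
  | x :: rest =>
      if 0 ≤ x ∧ x ≤ 0xFF then
        match pyBytes? rest with
        | some bs => some (x :: bs)
        | none => none
      else
        none

def normalize_u8_list_alt (value : List Int) : List Int :=
  match pyBytes? value with
  | some bs => bs        -- list(bytes(value))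
  | none => []           -- except (TypeError, ValueError)

-- ===== PRECONDITION & SPEC =====
def Spec_normalize_u8_list (value : List Int) (out : List Int) : Prop := out = normalize_u8_list_alt value
instance (value : List Int) (out : List Int) : Decidable (Spec_normalize_u8_list value out) := by unfold Spec_normalize_u8_list; infer_instance

-- ===== CLAIM (what is proved, stated in full; the proofs are below) =====
def Claim_equal_normalize_u8_list : Prop := ∀ (value : List Int), Dom_normalize_u8_list value → Spec_normalize_u8_list value (normalize_u8_list value)

-- ===== LEMMAS AND PROOFS =====
theorem normalize_u8_list_loop_eq_bytes (l acc : List Int) :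
    normalize_u8_list_loop acc l =
      match pyBytes? l with
      | some bs => acc ++ bs
      | none => [] := by
  induction l generalizing acc with
  | nil => simp [normalize_u8_list_loop, pyBytes?]
  | cons a t ih =>
      simp only [normalize_u8_list_loop, pyBytes?]
      by_cases h : 0 ≤ a ∧ a ≤ 0xFF
      · simp only [if_pos h, ih]
        cases pyBytes? t <;> simp
      · simp [h]

-- ===== VERDICT (by name: the statement is the Claim_ definition above) =====
theorem normalize_u8_list_spec : Claim_equal_normalize_u8_list := by
  intro value _
  unfold Spec_normalize_u8_list normalize_u8_list normalize_u8_list_alt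
  rw [normalize_u8_list_loop_eq_bytes]
  cases pyBytes? value <;> simp
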